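-- pv_equiv track=rewrite | github.com/RuSwift/garantex | services/tron_auth.py | validate_tron_address
-- ===== SOURCE A (Python) =====
-- def validate_tron_address(address: str) -> bool:
--     """
--     Валидирует TRON адрес в формате base58
--
--     Args:
--         address: TRON адрес для валидации
--
--     Returns:
--         True если адрес валиден, иначе False
--     """
--     # TRON адреса начинаются с 'T' и имеют длину 34 символа
--     if not address or not isinstance(address, str):
--         return False
--
--     if not address.startswith('T'):
--         return False
--
--     if len(address) != 34:
--         return False
--
--     # Проверяем, что адрес содержит только base58 символы
--     base58_chars = '123456789ABCDEFGHJKLMNPQRSTUVWXYZabcdefghijkmnopqrstuvwxyz'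
--     if not all(c in base58_chars for c in address):
--         return False
--
--     return True
-- ===== SOURCE B (Python) =====
-- # DFA run: one fold over the string with an integer state; no separate length/prefix/all passes.
-- def _b58(c):
--     return '1' <= c <= '9' or ('A' <= c <= 'Z' and c not in 'IO') or ('a' <= c <= 'z' and c != 'l')
--
--
-- def _step(state, c):
--     if state < 0:
--         return -1          # sink (reject) state
--     if state == 0:
--         return 1 if c == 'T' else -1
--     if state >= 34:
--         return -1          # string longer than 34 characters
--     return state + 1 if _b58(c) else -1
--
--
-- def validate_tron_address(address: str) -> bool:
--     if not isinstance(address, str):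
--         return False
--     state = 0
--     for c in address:
--         state = _step(state, c)
--     return state == 34
-- ===== Notes on version B (the rewrite author's own statement) =====
-- stated objective: alternative
-- what changed: Replaced A's staged guards (emptiness, startswith, length check, all()-membership scan over a 58-char alphabet string) by a single DFA run: one fold over the string with an integer state counter (sink -1), accepting iff the final state is 34; length and prefix checks disappear as separate passes.
import Mathlib
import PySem

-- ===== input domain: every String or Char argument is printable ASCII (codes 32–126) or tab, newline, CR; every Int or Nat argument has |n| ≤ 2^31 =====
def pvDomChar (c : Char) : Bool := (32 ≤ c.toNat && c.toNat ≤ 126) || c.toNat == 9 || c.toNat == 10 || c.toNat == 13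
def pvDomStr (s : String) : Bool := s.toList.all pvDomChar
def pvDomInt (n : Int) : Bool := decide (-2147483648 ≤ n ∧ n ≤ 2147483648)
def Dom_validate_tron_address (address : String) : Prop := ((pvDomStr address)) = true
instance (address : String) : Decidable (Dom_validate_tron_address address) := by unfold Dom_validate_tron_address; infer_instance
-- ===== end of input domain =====

-- B replaces A's staged guards and all()-scan by a single DFA run over the string
-- (integer state, sink -1, accept iff final state = 34); objective: alternative.
-- The isinstance(address, str) guard of the Pythons lies outside these String-typed ports.

-- ===== PORT A =====
def pvBase58Chars : List Char :=
  "123456789ABCDEFGHJKLMNPQRSTUVWXYZabcdefghijkmnopqrstuvwxyz".toList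

def validate_tron_address (address : String) : Bool :=
  -- 'not address' on a str is the empty-string test
  if address.toList = [] then false
  else if !(PySem.Str.startswith address "T") then false
  else if !(PySem.Str.len address == 34) then false
  -- 'c in base58_chars' for a single character c is exactly list membership
  else if !(address.toList.all (fun c => pvBase58Chars.contains c)) then false
  else true

-- ===== PORT B =====
-- Python's chained '<=' on single characters compares codepoints: exact as toNat comparisons.
def pvB58 (c : Char) : Bool :=
  (49 ≤ c.toNat && c.toNat ≤ 57)
    || (65 ≤ c.toNat && c.toNat ≤ 90 && !(['I', 'O'] : List Char).contains c)
    || (97 ≤ c.toNat && c.toNat ≤ 122 && c ≠ 'l')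

def pvStep (state : Int) (c : Char) : Int :=
  if state < 0 then -1
  else if state = 0 then (if c = 'T' then 1 else -1)
  else if state ≥ 34 then -1
  else if pvB58 c then state + 1 else -1

def validate_tron_address_alt (address : String) : Bool :=
  address.toList.foldl pvStep 0 == 34

-- ===== PRECONDITION & SPEC =====
def Spec_validate_tron_address (address : String) (out : Bool) : Prop := out = validate_tron_address_alt address
instance (address : String) (out : Bool) : Decidable (Spec_validate_tron_address address out) := by unfold Spec_validate_tron_address; infer_instance

-- ===== CLAIM (what is proved, stated in full; the proofs are below) =====
def Claim_equal_validate_tron_address : Prop := ∀ (address : String), Dom_validate_tron_address address → Spec_validate_tron_address address (validate_tron_address address)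

-- ===== LEMMAS AND PROOFS =====

-- the two character tests, computed kernel-side on every 7-bit codepoint
theorem pvChar_enum :
    ((List.range 128).all
      (fun n => pvBase58Chars.contains (Char.ofNat n) == pvB58 (Char.ofNat n))) = true := by
  decide

-- the two character tests agree on every character of the printable-ASCII domain
theorem pvChar_agree (c : Char) (h : c.toNat < 128) :
    pvBase58Chars.contains c = pvB58 c := by
  have hmem : c.toNat ∈ List.range 128 := List.mem_range.mpr h
  have := List.all_eq_true.mp pvChar_enum c.toNat hmem
  have hc : Char.ofNat c.toNat = c := Char.ofNat_toNat c
  rw [hc] at this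
  exact beq_iff_eq.mp this

-- the membership scan and the arithmetic class test agree listwise on ASCII
theorem pvAllCongr (l : List Char) (h : ∀ c ∈ l, c.toNat < 128) :
    l.all (fun c => pvBase58Chars.contains c) = l.all pvB58 := by
  induction l with
  | nil => rfl
  | cons x xs ih =>
    have hx := pvChar_agree x (h x List.mem_cons_self)
    have ih' := ih (fun c hc => h c (List.mem_cons_of_mem _ hc))
    simp only [List.all_cons, hx, ih']

-- the sink state -1 absorbs
theorem pvStep_sink (l : List Char) : l.foldl pvStep (-1) = -1 := by
  induction l with
  | nil => rfl
  | cons c cs ih => simpa [pvStep] using ih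

-- DFA run from a live state k ≥ 1: accepts iff exactly 34 - k base58 chars remain
theorem pvRun_eq (l : List Char) (k : Int) (hk : 1 ≤ k) :
    (l.foldl pvStep k = 34) ↔ (k + l.length = 34 ∧ l.all pvB58 = true) := by
  induction l generalizing k with
  | nil =>
    simp only [List.foldl_nil, List.length_nil, Nat.cast_zero, List.all_nil, and_true]
    omega
  | cons c cs ih =>
    simp only [List.foldl_cons]
    by_cases hbig : k ≥ 34
    · have hstep : pvStep k c = -1 := by
        simp [pvStep]; omega
      rw [hstep, pvStep_sink]
      constructor
      · intro h; omega
      · rintro ⟨h, -⟩; simp at h; omega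
    · by_cases hc : pvB58 c = true
      · have hstep : pvStep k c = k + 1 := by
          simp [pvStep, hc]; omega
        rw [hstep, ih (k + 1) (by omega)]
        simp [hc]; omega
      · have hstep : pvStep k c = -1 := by
          simp [pvStep, hc]; omega
        rw [hstep, pvStep_sink]
        constructor
        · intro h; omega
        · rintro ⟨-, h⟩; simp [hc] at h

theorem validate_tron_address_spec : Claim_equal_validate_tron_address := by
  intro address hdom
  unfold Spec_validate_tron_address validate_tron_address validate_tron_address_alt
  have hdom' : ∀ c ∈ address.toList, c.toNat < 128 := by
    intro c hc
    have := List.all_eq_true.mp hdom c hc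
    simp only [pvDomChar, Bool.or_eq_true, Bool.and_eq_true, decide_eq_true_eq, beq_iff_eq] at this
    omega
  cases hl : address.toList with
  | nil => simp
  | cons c cs =>
    have hT : pvB58 'T' = true := by decide
    have hstep0 : pvStep 0 c = if c = 'T' then 1 else -1 := by simp [pvStep]
    by_cases hcT : c = 'T'
    · subst hcT
      have hrun := pvRun_eq cs 1 (by omega)
      have hallcong : cs.all (fun x => pvBase58Chars.contains x) = cs.all pvB58 :=
        pvAllCongr cs (fun x hx => hdom' x (by simp [hl, hx]))
      simp only [List.foldl_cons, hstep0]
      simp only [PySem.Str.startswith_eq, PySem.Str.len_eq, hl]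
      by_cases h34 : cs.length = 33
      · simp [PySem.Chars.startswith, List.isPrefixOf, h34]
        rw [Bool.eq_iff_iff]
        simp only [Bool.and_eq_true, decide_eq_true_eq, Bool.not_eq_true',
          decide_eq_false_iff_not, not_exists, not_and, not_not, beq_iff_eq, hrun, h34]
        rw [← hallcong]
        simp [List.all_eq_true]
        intro _
        decide
      · have hrun' : List.foldl pvStep 1 cs ≠ 34 := by
          intro h
          have := (hrun.mp h).1
          omega
        have hlen : ¬((cs.length : Int) + 1 = 34) := by omega
        simp [PySem.Chars.startswith, List.isPrefixOf, hlen, hrun']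
    · have hrun' : (c :: cs).foldl pvStep 0 = -1 := by
        simp [List.foldl_cons, hstep0, hcT, pvStep_sink]
      simp [PySem.Str.startswith_eq, hl, PySem.Chars.startswith, List.isPrefixOf, hrun']
      intro h
      exact absurd h.symm hcT
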